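-- pv_equiv track=rewrite | github.com/GeorgeGantus/CompetitiveProgramming | BinarySearch/MakeItGood/makeitgood.py | verifyIfItsGood
-- ===== SOURCE A (Python) =====
-- def verifyIfItsGood(array):
--     i = 0
--     j = len(array)-1
--     currElement = 0
--     while(i != j):
--         if array[i] <= array[j]:
--             mini = array[i]
--             i += 1
--         else:
--             mini = array[j]
--             j -= 1
--
--         if mini < currElement:
--             return False
--         else:
--             currElement = mini
--     if array[i] < currElement:
--         return False
--     return True
-- ===== SOURCE B (Python) =====
-- def verifyIfItsGood(array):
--     if array[0] < 0 or array[-1] < 0: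
--         return False
--     n = len(array)
--     i = 1
--     while i < n and array[i-1] <= array[i]:
--         i += 1
--     while i < n and array[i-1] >= array[i]:
--         i += 1
--     return i == n
-- ===== Notes on version B (the rewrite author's own statement) =====
-- stated objective: simpler
-- what changed: A peels the smaller of the two ends with two converging pointers while checking the peeled values are non-decreasing from 0; B recognises that this accepts exactly the non-negative 'mountain' arrays and does one forward scan (advance through the non-decreasing phase, then through the non-increasing phase) plus a non-negativity check of the two endpoints.
import Mathlib
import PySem

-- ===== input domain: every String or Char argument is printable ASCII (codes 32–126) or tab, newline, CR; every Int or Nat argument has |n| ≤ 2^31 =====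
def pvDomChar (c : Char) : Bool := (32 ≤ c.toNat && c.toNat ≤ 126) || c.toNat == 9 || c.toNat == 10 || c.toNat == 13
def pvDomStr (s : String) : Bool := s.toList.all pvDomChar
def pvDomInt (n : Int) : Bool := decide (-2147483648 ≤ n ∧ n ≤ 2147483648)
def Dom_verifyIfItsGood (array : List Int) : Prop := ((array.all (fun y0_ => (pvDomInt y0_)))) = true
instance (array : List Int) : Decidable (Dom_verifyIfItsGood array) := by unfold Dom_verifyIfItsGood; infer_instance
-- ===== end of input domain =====

-- ===== PORT A =====
-- B replaces A's two-pointer peel of the smaller end by a single forward mountain scan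
-- plus a non-negativity check of the endpoints; equivalence of the RETURN value on
-- non-empty arrays is proved (both raise IndexError on []).
-- The while loop of A is ported with fuel; `j - i` iterations happen, so fuel = length
-- is always sufficient on inputs admitted by Pre_. Indices stay in range there, so
-- array[i] / array[j] are ported with getD.
def pvLoopA (array : List Int) : Nat → Int → Nat → Nat → Bool
  | 0, curr, i, _ =>
      if array.getD i 0 < curr then false else true
  | fuel+1, curr, i, j =>
      if i = j then
        (if array.getD i 0 < curr then false else true)
      else
        if array.getD i 0 ≤ array.getD j 0 then
          let mini := array.getD i 0
          if mini < curr then false else pvLoopA array fuel mini (i+1) j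
        else
          let mini := array.getD j 0
          if mini < curr then false else pvLoopA array fuel mini i (j-1)

def verifyIfItsGood (array : List Int) : Bool :=
  pvLoopA array array.length 0 0 (array.length - 1)

-- ===== PORT B =====
-- both while loops of B ported with fuel (each advances i by 1 up to n, so fuel = n suffices)
def pvLoopUp (array : List Int) (n : Nat) : Nat → Nat → Nat
  | 0, i => i
  | fuel+1, i =>
      if i < n ∧ array.getD (i-1) 0 ≤ array.getD i 0 then pvLoopUp array n fuel (i+1) else i

def pvLoopDown (array : List Int) (n : Nat) : Nat → Nat → Nat
  | 0, i => i
  | fuel+1, i =>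
      if i < n ∧ array.getD i 0 ≤ array.getD (i-1) 0 then pvLoopDown array n fuel (i+1) else i

def verifyIfItsGood_alt (array : List Int) : Bool :=
  -- array[0] / array[-1]: in range on non-empty input (Pre_), ported with getD/getLastD
  if array.getD 0 0 < 0 ∨ array.getLastD 0 < 0 then false
  else
    let n := array.length
    let i := pvLoopUp array n n 1
    let i' := pvLoopDown array n n i
    i' == n

-- ===== PRECONDITION & SPEC =====
-- Pre_ excludes only the empty list, on which A (and B) raise IndexError.
def Pre_verifyIfItsGood (array : List Int) : Prop := array ≠ []
instance (array : List Int) : Decidable (Pre_verifyIfItsGood array) := by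
  unfold Pre_verifyIfItsGood; infer_instance
def pvWitness_verifyIfItsGood : List Int := ([1, 3, 2])
def Spec_verifyIfItsGood (array : List Int) (out : Bool) : Prop := out = verifyIfItsGood_alt array
instance (array : List Int) (out : Bool) : Decidable (Spec_verifyIfItsGood array out) := by unfold Spec_verifyIfItsGood; infer_instance

-- ===== CLAIM (what is proved, stated in full; the proofs are below) =====
def Claim_equal_verifyIfItsGood : Prop := ∀ (array : List Int), Dom_verifyIfItsGood array → Pre_verifyIfItsGood array → Spec_verifyIfItsGood array (verifyIfItsGood array)

-- ===== LEMMAS AND PROOFS =====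

-- last element of a list, with default 0
def pvLast (l : List Int) : Int := l.getLast?.getD 0

theorem pvLast_cons_cons (a b : Int) (t : List Int) :
    pvLast (a :: b :: t) = pvLast (b :: t) := by
  simp [pvLast]

-- list-level reformulation of A: peel the smaller end, it must be ≥ curr
def pvPeel (curr : Int) : List Int → Bool
  | [] => true
  | [a] => if a < curr then false else true
  | a :: b :: t =>
      let L := pvLast (b :: t)
      if a ≤ L then
        (if a < curr then false else pvPeel a (b :: t))
      else
        (if L < curr then false else pvPeel L ((a :: b :: t).dropLast))
  termination_by l => l.length
  decreasing_by
    · simp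
    · simp [List.length_dropLast]

-- Bool-valued "non-increasing chain"
def pvNi : List Int → Bool
  | a :: b :: t => decide (b ≤ a) && pvNi (b :: t)
  | _ => true

-- Bool-valued "mountain" (non-decreasing then non-increasing)
def pvM : List Int → Bool
  | a :: b :: t => if a ≤ b then pvM (b :: t) else pvNi (a :: b :: t)
  | _ => true

theorem pvNi_last_le_head (t : List Int) (a : Int) (h : pvNi (a :: t) = true) :
    pvLast (a :: t) ≤ a := by
  induction t generalizing a with
  | nil => simp [pvLast]
  | cons b t ih =>
      simp only [pvNi, Bool.and_eq_true, decide_eq_true_eq] at h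
      calc pvLast (a :: b :: t) = pvLast (b :: t) := pvLast_cons_cons ..
        _ ≤ b := ih b h.2
        _ ≤ a := h.1

theorem pvNi_dropLast (t : List Int) (a b : Int) :
    pvNi (a :: b :: t) =
      (pvNi ((a :: b :: t).dropLast) &&
        decide (pvLast (a :: b :: t) ≤ pvLast ((a :: b :: t).dropLast))) := by
  induction t generalizing a b with
  | nil => simp [pvNi, pvLast, Bool.and_comm]
  | cons c t ih =>
      have hd : (a :: b :: c :: t).dropLast = a :: (b :: c :: t).dropLast := rfl
      have hd2 : (b :: c :: t).dropLast = b :: (c :: t).dropLast := rfl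
      show (decide (b ≤ a) && pvNi (b :: c :: t)) = _
      rw [ih b c]
      simp only [hd, hd2, pvLast_cons_cons]
      rw [show pvNi (a :: b :: (c :: t).dropLast)
            = (decide (b ≤ a) && pvNi (b :: (c :: t).dropLast)) from rfl,
          Bool.and_assoc]

theorem pvM_dropLast (t : List Int) (a b : Int)
    (h : pvLast (a :: b :: t) < a) :
    pvM (a :: b :: t) =
      (pvM ((a :: b :: t).dropLast) &&
        decide (pvLast (a :: b :: t) ≤ pvLast ((a :: b :: t).dropLast))) := by
  induction t generalizing a b with
  | nil =>
      rw [pvLast_cons_cons] at h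
      simp only [pvLast, List.getLast?_singleton, Option.getD_some] at h ⊢
      have hab : ¬ a ≤ b := by omega
      simp [pvM, pvNi, List.dropLast, hab, Bool.and_comm]
  | cons c t ih =>
      have hd : (a :: b :: c :: t).dropLast = a :: (b :: c :: t).dropLast := rfl
      have hd2 : (b :: c :: t).dropLast = b :: (c :: t).dropLast := rfl
      by_cases hab : a ≤ b
      · -- ascent at the front: strip `a` on both sides
        have hb : pvLast (b :: c :: t) < b := by
          rw [pvLast_cons_cons] at h; omega
        have hM : pvM (a :: b :: c :: t) = pvM (b :: c :: t) := by
          rw [show pvM (a :: b :: c :: t)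
                = (if a ≤ b then pvM (b :: c :: t) else pvNi (a :: b :: c :: t)) from rfl,
              if_pos hab]
        have hM2 : pvM ((a :: b :: c :: t).dropLast) = pvM ((b :: c :: t).dropLast) := by
          rw [hd, hd2,
            show pvM (a :: b :: (c :: t).dropLast)
              = (if a ≤ b then pvM (b :: (c :: t).dropLast)
                 else pvNi (a :: b :: (c :: t).dropLast)) from rfl,
            if_pos hab]
        rw [hM, hM2, ih b c hb, pvLast_cons_cons a b (c :: t)]
        rw [hd, hd2, pvLast_cons_cons a b ((c :: t).dropLast), ← hd2]
      · -- descent at the front: pvM is pvNi on both sides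
        have hM : pvM (a :: b :: c :: t) = pvNi (a :: b :: c :: t) := by
          rw [show pvM (a :: b :: c :: t)
                = (if a ≤ b then pvM (b :: c :: t) else pvNi (a :: b :: c :: t)) from rfl,
              if_neg hab]
        have hM2 : pvM ((a :: b :: c :: t).dropLast) = pvNi ((a :: b :: c :: t).dropLast) := by
          rw [hd, hd2,
            show pvM (a :: b :: (c :: t).dropLast)
              = (if a ≤ b then pvM (b :: (c :: t).dropLast)
                 else pvNi (a :: b :: (c :: t).dropLast)) from rfl,
            if_neg hab, ← hd2, ← hd]
        rw [hM, hM2, pvNi_dropLast]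

theorem pvPeel_eq (n : Nat) :
    ∀ (l : List Int) (curr : Int), l.length ≤ n → l ≠ [] →
      pvPeel curr l =
        (decide (curr ≤ l.headD 0) && decide (curr ≤ pvLast l) && pvM l) := by
  induction n with
  | zero => intro l curr hl hne; cases l <;> simp_all
  | succ n ih =>
      intro l curr hl hne
      match l with
      | [a] =>
          by_cases hc : a < curr <;> · simp [pvPeel, pvM, pvLast, hc]; try omega
      | a :: b :: t =>
          have hlen : (b :: t).length ≤ n := by simp at hl ⊢; omega
          rw [show pvPeel curr (a :: b :: t) =
            (if a ≤ pvLast (b :: t) then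
              (if a < curr then false else pvPeel a (b :: t))
            else
              (if pvLast (b :: t) < curr then false
               else pvPeel (pvLast (b :: t)) ((a :: b :: t).dropLast))) from by
            rw [pvPeel]]
          rw [pvLast_cons_cons]
          by_cases haL : a ≤ pvLast (b :: t)
          · -- A peels the head
            rw [if_pos haL, ih (b :: t) a hlen (by simp)]
            by_cases hab : a ≤ b
            · have hM : pvM (a :: b :: t) = pvM (b :: t) := by simp [pvM, hab]
              rw [hM]
              simp only [List.headD_cons]
              by_cases hc : a < curr
              · simp [hc]
              · have h1 : curr ≤ a := by omega
                have h2 : curr ≤ pvLast (b :: t) := le_trans h1 haL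
                simp [hc, hab, haL, h1, h2]
            · have hM : pvM (a :: b :: t) = pvNi (a :: b :: t) := by simp [pvM, hab]
              have hni : pvNi (b :: t) = false := by
                cases hh : pvNi (b :: t)
                · rfl
                · have := pvNi_last_le_head t b hh
                  omega
              have hni2 : pvNi (a :: b :: t) = false := by
                show (decide (b ≤ a) && pvNi (b :: t)) = false
                simp [hni]
              simp [hM, hni2, hab]
          · -- A peels the last element
            have hLa : pvLast (b :: t) < a := by omega
            rw [if_neg haL]
            have hdl : (a :: b :: t).dropLast ≠ [] := by
              cases t <;> simp [List.dropLast]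
            have hdlen : ((a :: b :: t).dropLast).length ≤ n := by
              simp [List.length_dropLast] at hl ⊢; omega
            rw [ih ((a :: b :: t).dropLast) (pvLast (b :: t)) hdlen hdl]
            have hhd : ((a :: b :: t).dropLast).headD 0 = a := by
              cases t <;> simp [List.dropLast]
            have hML := pvM_dropLast t a b (by rw [pvLast_cons_cons]; exact hLa)
            rw [pvLast_cons_cons] at hML
            rw [hhd, hML]
            simp only [List.headD_cons]
            by_cases hc : pvLast (b :: t) < curr
            · have : ¬ curr ≤ pvLast (b :: t) := by omega
              simp [hc, this]
            · have h1 : curr ≤ pvLast (b :: t) := by omega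
              have h2 : curr ≤ a := by omega
              have h3 : pvLast (b :: t) ≤ a := by omega
              simp only [hc, if_false, h1, h2, h3, decide_true, Bool.true_and]
              cases hx : decide (pvLast (b :: t) ≤ pvLast ((a :: b :: t).dropLast)) <;>
                cases hy : pvM ((a :: b :: t).dropLast) <;> simp

-- segment array[i..j] (inclusive), as A's converging pointers see it
def pvSeg (array : List Int) (i j : Nat) : List Int := (array.take (j+1)).drop i

theorem pvSeg_length (array : List Int) (i j : Nat) (hij : i ≤ j) (hj : j < array.length) :
    (pvSeg array i j).length = j + 1 - i := by
  rw [pvSeg, List.length_drop, List.length_take]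
  omega

theorem pvSeg_head (array : List Int) (i j : Nat) (hij : i ≤ j) (_hj : j < array.length) :
    (pvSeg array i j).headD 0 = array.getD i 0 := by
  rw [List.headD_eq_head?_getD, pvSeg, List.head?_drop,
    List.getElem?_take_of_lt (by omega), List.getD_eq_getElem?_getD]

theorem pvSeg_last (array : List Int) (i j : Nat) (hij : i ≤ j) (hj : j < array.length) :
    pvLast (pvSeg array i j) = array.getD j 0 := by
  rw [pvLast, List.getLast?_eq_getElem?, pvSeg_length array i j hij hj]
  rw [pvSeg, List.getElem?_drop, List.getElem?_take_of_lt (by omega),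
    List.getD_eq_getElem?_getD]
  have hidx : i + (j + 1 - i - 1) = j := by omega
  rw [hidx]

theorem pvSeg_tail (array : List Int) (i j : Nat) :
    (pvSeg array i j).tail = pvSeg array (i+1) j := by
  simp [pvSeg, List.tail_drop]

theorem pvSeg_dropLast (array : List Int) (i j : Nat) (hij : i < j) (hj : j < array.length) :
    (pvSeg array i j).dropLast = pvSeg array i (j-1) := by
  apply List.ext_getElem
  · simp [pvSeg]; omega
  · intro k h1 h2
    simp only [pvSeg, List.getElem_dropLast, List.getElem_drop, List.getElem_take]

theorem pvLoopA_eq_peel (array : List Int) :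
    ∀ (fuel i j : Nat) (curr : Int), i ≤ j → j < array.length → j - i ≤ fuel →
      pvLoopA array fuel curr i j = pvPeel curr (pvSeg array i j) := by
  intro fuel
  induction fuel with
  | zero =>
      intro i j curr hij hj hf
      have : i = j := by omega
      subst this
      have : pvSeg array i i = [array.getD i 0] := by
        have h1 := pvSeg_length array i i le_rfl hj
        have h2 := pvSeg_head array i i le_rfl hj
        match hs : pvSeg array i i with
        | [] => rw [hs] at h1; simp at h1; try omega
        | [x] => rw [hs] at h2; simp at h2; rw [h2, List.getD_eq_getElem?_getD]
        | x :: y :: t => rw [hs] at h1; simp at h1; try omega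
      rw [this]
      simp [pvLoopA, pvPeel]
  | succ fuel ih =>
      intro i j curr hij hj hf
      by_cases hij' : i = j
      · subst hij'
        have : pvSeg array i i = [array.getD i 0] := by
          have h1 := pvSeg_length array i i le_rfl hj
          have h2 := pvSeg_head array i i le_rfl hj
          match hs : pvSeg array i i with
          | [] => rw [hs] at h1; simp at h1; try omega
          | [x] => rw [hs] at h2; simp at h2; rw [h2, List.getD_eq_getElem?_getD]
          | x :: y :: t => rw [hs] at h1; simp at h1; try omega
        rw [this]
        simp [pvLoopA, pvPeel]
      · have hlt : i < j := by omega
        have hlen2 : 2 ≤ (pvSeg array i j).length := by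
          rw [pvSeg_length array i j hij hj]; omega
        obtain ⟨x, y, t, hs⟩ : ∃ x y t, pvSeg array i j = x :: y :: t := by
          match hs : pvSeg array i j with
          | [] => rw [hs] at hlen2; simp at hlen2
          | [x] => rw [hs] at hlen2; simp at hlen2
          | x :: y :: t => exact ⟨x, y, t, rfl⟩
        have hhd : x = array.getD i 0 := by
          have := pvSeg_head array i j hij hj; rw [hs] at this; simpa using this
        subst hhd
        have hlast : pvLast (y :: t) = array.getD j 0 := by
          have := pvSeg_last array i j hij hj
          rw [hs, pvLast_cons_cons] at this; exact this
        have htail : (y :: t) = pvSeg array (i+1) j := by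
          rw [← pvSeg_tail array i j, hs]
          rfl
        have hdrop : (array.getD i 0 :: y :: t).dropLast = pvSeg array i (j-1) := by
          rw [← hs, pvSeg_dropLast array i j hlt hj]
        have hpeel : pvPeel curr (pvSeg array i j) =
            (if array.getD i 0 ≤ array.getD j 0 then
              (if array.getD i 0 < curr then false
               else pvPeel (array.getD i 0) (pvSeg array (i+1) j))
            else
              (if array.getD j 0 < curr then false
               else pvPeel (array.getD j 0) (pvSeg array i (j-1)))) := by
          rw [hs,
            show pvPeel curr (array.getD i 0 :: y :: t)
              = (if array.getD i 0 ≤ pvLast (y :: t) then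
                  (if array.getD i 0 < curr then false
                   else pvPeel (array.getD i 0) (y :: t))
                 else
                  (if pvLast (y :: t) < curr then false
                   else pvPeel (pvLast (y :: t)) ((array.getD i 0 :: y :: t).dropLast)))
              from by rw [pvPeel],
            hdrop, hlast, htail]
        rw [hpeel]
        show pvLoopA array (fuel+1) curr i j = _
        simp only [pvLoopA, if_neg hij', List.getD_eq_getElem?_getD]
        rw [ih (i+1) j (array[i]?.getD 0) (by omega) hj (by omega),
            ih i (j-1) (array[j]?.getD 0) (by omega) (by omega) (by omega)]

theorem pvDrop_cons (array : List Int) (i : Nat) (h : i < array.length) :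
    array.drop i = array.getD i 0 :: array.drop (i+1) := by
  rw [List.drop_eq_getElem_cons h, List.getD_eq_getElem?_getD, List.getElem?_eq_getElem h]
  rfl

theorem pvLoopDown_eq (array : List Int) :
    ∀ (fuel i : Nat), 1 ≤ i → i ≤ array.length → array.length - i ≤ fuel →
      ((pvLoopDown array array.length fuel i == array.length) : Bool)
        = pvNi (array.drop (i-1)) := by
  intro fuel
  induction fuel with
  | zero =>
      intro i h1 h2 hf
      have hend : i = array.length := by omega
      subst hend
      rw [pvDrop_cons array (array.length - 1) (by omega),
        show array.length - 1 + 1 = array.length from by omega]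
      simp [pvLoopDown, pvNi]
  | succ fuel ih =>
      intro i h1 h2 hf
      rw [pvLoopDown]
      by_cases hcond : i < array.length ∧ array.getD i 0 ≤ array.getD (i-1) 0
      · rw [if_pos hcond, ih (i+1) (by omega) (by omega) (by omega), Nat.add_sub_cancel]
        conv_rhs => rw [pvDrop_cons array (i-1) (by omega),
          show i - 1 + 1 = i from by omega, pvDrop_cons array i hcond.1]
        rw [show pvNi (array.getD (i-1) 0 :: array.getD i 0 :: array.drop (i+1))
              = (decide (array.getD i 0 ≤ array.getD (i-1) 0)
                  && pvNi (array.getD i 0 :: array.drop (i+1))) from rfl]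
        rw [← pvDrop_cons array i hcond.1]
        have hc2 : array[i]?.getD 0 ≤ array[i-1]?.getD 0 := by
          rw [← List.getD_eq_getElem?_getD, ← List.getD_eq_getElem?_getD]
          exact hcond.2
        simp [hc2]
      · rw [if_neg hcond]
        by_cases hend : i = array.length
        · subst hend
          rw [pvDrop_cons array (array.length - 1) (by omega),
            show array.length - 1 + 1 = array.length from by omega]
          simp [pvNi]
        · have hlt : i < array.length := by omega
          have hgt : ¬ array.getD i 0 ≤ array.getD (i-1) 0 := by
            intro h; exact hcond ⟨hlt, h⟩
          rw [pvDrop_cons array (i-1) (by omega), show i - 1 + 1 = i from by omega,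
            pvDrop_cons array i hlt]
          rw [show pvNi (array.getD (i-1) 0 :: array.getD i 0 :: array.drop (i+1))
                = (decide (array.getD i 0 ≤ array.getD (i-1) 0)
                    && pvNi (array.getD i 0 :: array.drop (i+1))) from rfl]
          have hgt' : ¬ array[i]?.getD 0 ≤ array[i-1]?.getD 0 := by
            rw [← List.getD_eq_getElem?_getD, ← List.getD_eq_getElem?_getD]
            exact hgt
          simp [hgt', Nat.ne_of_lt hlt]

theorem pvLoopUp_eq (array : List Int) :
    ∀ (fuel i : Nat), 1 ≤ i → i ≤ array.length → array.length - i ≤ fuel →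
      ((pvLoopDown array array.length array.length (pvLoopUp array array.length fuel i)
          == array.length) : Bool)
        = pvM (array.drop (i-1)) := by
  intro fuel
  induction fuel with
  | zero =>
      intro i h1 h2 hf
      have hend : i = array.length := by omega
      subst hend
      rw [show pvLoopUp array array.length 0 array.length = array.length from rfl]
      rw [pvLoopDown_eq array array.length array.length (by omega) le_rfl (by omega)]
      rw [pvDrop_cons array (array.length - 1) (by omega),
        show array.length - 1 + 1 = array.length from by omega]
      simp [pvNi, pvM]
  | succ fuel ih =>
      intro i h1 h2 hf
      rw [pvLoopUp]
      by_cases hcond : i < array.length ∧ array.getD (i-1) 0 ≤ array.getD i 0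
      · rw [if_pos hcond, ih (i+1) (by omega) (by omega) (by omega), Nat.add_sub_cancel]
        conv_rhs => rw [pvDrop_cons array (i-1) (by omega),
          show i - 1 + 1 = i from by omega, pvDrop_cons array i hcond.1]
        rw [show pvM (array.getD (i-1) 0 :: array.getD i 0 :: array.drop (i+1))
              = (if array.getD (i-1) 0 ≤ array.getD i 0 then
                  pvM (array.getD i 0 :: array.drop (i+1))
                 else pvNi (array.getD (i-1) 0 :: array.getD i 0 :: array.drop (i+1)))
              from rfl]
        rw [if_pos hcond.2, ← pvDrop_cons array i hcond.1]
      · rw [if_neg hcond]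
        rw [pvLoopDown_eq array array.length i h1 h2 (by omega)]
        by_cases hend : i = array.length
        · subst hend
          rw [pvDrop_cons array (array.length - 1) (by omega),
            show array.length - 1 + 1 = array.length from by omega]
          simp [pvNi, pvM]
        · have hlt : i < array.length := by omega
          have hgt : ¬ array.getD (i-1) 0 ≤ array.getD i 0 := by
            intro h; exact hcond ⟨hlt, h⟩
          rw [pvDrop_cons array (i-1) (by omega), show i - 1 + 1 = i from by omega,
            pvDrop_cons array i hlt]
          rw [show pvM (array.getD (i-1) 0 :: array.getD i 0 :: array.drop (i+1))
                = (if array.getD (i-1) 0 ≤ array.getD i 0 then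
                    pvM (array.getD i 0 :: array.drop (i+1))
                   else pvNi (array.getD (i-1) 0 :: array.getD i 0 :: array.drop (i+1)))
                from rfl]
          rw [if_neg hgt]

-- ===== VERDICT (by name: the statement is the Claim_ definition above) =====
theorem verifyIfItsGood_spec : Claim_equal_verifyIfItsGood := by
  intro array _ hpre
  unfold Spec_verifyIfItsGood Pre_verifyIfItsGood at *
  have hn : 1 ≤ array.length := by
    cases array
    · exact absurd rfl hpre
    · simp
  have hseg : pvSeg array 0 (array.length - 1) = array := by
    simp [pvSeg]
    omega
  have hA : verifyIfItsGood array =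
      (decide ((0:Int) ≤ array.headD 0) && decide ((0:Int) ≤ pvLast array) && pvM array) := by
    rw [verifyIfItsGood,
      pvLoopA_eq_peel array array.length 0 (array.length - 1) 0 (by omega) (by omega) (by omega),
      hseg, pvPeel_eq array.length array 0 le_rfl hpre]
  have hgd : array.getD 0 0 = array.headD 0 := by
    cases array <;> simp
  have hgl : array.getLastD 0 = pvLast array := by
    rw [pvLast, List.getLastD_eq_getLast?]
  have hB : verifyIfItsGood_alt array =
      (if array.headD 0 < 0 ∨ pvLast array < 0 then false else pvM array) := by
    rw [verifyIfItsGood_alt, hgd, hgl]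
    by_cases hneg : array.headD 0 < 0 ∨ pvLast array < 0
    · rw [if_pos hneg, if_pos hneg]
    · rw [if_neg hneg, if_neg hneg]
      show (pvLoopDown array array.length array.length
              (pvLoopUp array array.length array.length 1) == array.length) = pvM array
      have := pvLoopUp_eq array array.length 1 le_rfl hn (by omega)
      rw [show (1:Nat) - 1 = 0 from rfl, List.drop_zero] at this
      exact this
  rw [hA, hB, List.headD_eq_head?_getD]
  generalize array.head?.getD 0 = gh
  generalize pvLast array = gl
  by_cases h1 : gh < 0 <;> by_cases h2 : gl < 0
  · simp [h1, h2, show ¬ (0:Int) ≤ gh from by omega]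
  · simp [h1, h2, show ¬ (0:Int) ≤ gh from by omega]
  · simp [h1, h2, show (0:Int) ≤ gh from by omega,
      show ¬ (0:Int) ≤ gl from by omega]
  · simp [h1, h2, show (0:Int) ≤ gh from by omega,
      show (0:Int) ≤ gl from by omega]
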